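-- pv_equiv track=rewrite | github.com/AliKh-dev/AdvanceProgramming | HW3_Python/Q1.py | key_max_and_min_value
-- ===== SOURCE A (Python) =====
-- def key_max_and_min_value(entry: dict) -> str:
--     maximum = max(entry.values())
--     minimum = min(entry.values())
--     key_maximum = None
--     key_minimum = None
--     for key in entry.keys():
--         if entry[key] == maximum:
--             key_maximum = key
--         if entry[key] == minimum:
--             key_minimum = key
--     return key_maximum, key_minimum
-- ===== SOURCE B (Python) =====
-- def key_max_and_min_value(entry: dict) -> str:
--     items = iter(entry.items())
--     try:
--         key_max, max_val = next(items)
--     except StopIteration: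
--         raise ValueError("key_max_and_min_value() arg is an empty dict")
--     key_min, min_val = key_max, max_val
--     for key, value in items:
--         if value >= max_val:
--             key_max, max_val = key, value
--         if value <= min_val:
--             key_min, min_val = key, value
--     return key_max, key_min
-- ===== Notes on version B (the rewrite author's own statement) =====
-- stated objective: simpler
-- what changed: Replaced the three passes (max of values, min of values, then a key loop with per-key dict lookups) by one single pass over items() that tracks running max/min with their keys, updating on >=/<= to keep the last key on ties.
import Mathlib
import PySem

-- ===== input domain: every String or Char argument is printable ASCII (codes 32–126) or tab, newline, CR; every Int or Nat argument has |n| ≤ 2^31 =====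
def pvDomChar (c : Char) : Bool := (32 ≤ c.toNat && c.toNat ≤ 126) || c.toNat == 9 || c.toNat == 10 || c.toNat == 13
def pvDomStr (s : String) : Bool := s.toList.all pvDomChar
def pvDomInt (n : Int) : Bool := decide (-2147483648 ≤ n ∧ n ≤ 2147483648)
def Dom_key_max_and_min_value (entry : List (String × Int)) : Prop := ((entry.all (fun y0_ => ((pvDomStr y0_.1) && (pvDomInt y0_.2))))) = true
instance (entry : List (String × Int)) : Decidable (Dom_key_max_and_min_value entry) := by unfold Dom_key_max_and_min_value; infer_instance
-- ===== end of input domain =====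

-- B replaces A's three passes (max, min, key loop with dict lookups) by one pass over
-- the items keeping running max/min with their keys (>=/<= keeps the last key on ties).

-- ===== PORT A =====
def key_max_and_min_value (entry : List (String × Int)) : String × String :=
  match PySem.List.max? (entry.map Prod.snd) (fun y => y),
        PySem.List.min? (entry.map Prod.snd) (fun y => y) with
  | some maximum, some minimum =>
    let d := PySem.Dict.mk entry
    let s := (entry.map Prod.fst).foldl
      (fun (s : Option String × Option String) key =>
        (if d.get? key = some maximum then some key else s.1,
         if d.get? key = some minimum then some key else s.2))
      (none, none)
    ((s.1).getD "", (s.2).getD "")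
  | _, _ => ("", "")   -- max() raises ValueError on an empty dict: excluded by Pre_

-- ===== PORT B =====
def key_max_and_min_value_alt (entry : List (String × Int)) : String × String :=
  match entry with
  | [] => ("", "")     -- B raises ValueError on an empty dict: excluded by Pre_
  | first :: rest =>
    let st := rest.foldl
      (fun (st : (String × Int) × (String × Int)) kv =>
        (if kv.2 ≥ st.1.2 then kv else st.1,
         if kv.2 ≤ st.2.2 then kv else st.2))
      (first, first)
    (st.1.1, st.2.1)

-- ===== PRECONDITION & SPEC =====
-- Pre_ excludes the empty dict (both A and B raise ValueError there) and lists with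
-- duplicate keys, which do not represent a Python dict (the input type of A).
def Pre_key_max_and_min_value (entry : List (String × Int)) : Prop :=
  entry ≠ [] ∧ (entry.map Prod.fst).Nodup
instance (entry : List (String × Int)) : Decidable (Pre_key_max_and_min_value entry) := by
  unfold Pre_key_max_and_min_value; infer_instance
def pvWitness_key_max_and_min_value : (List (String × Int)) := [("a", 3), ("b", -1), ("c", 3)]

def Spec_key_max_and_min_value (entry : List (String × Int)) (out : String × String) : Prop := out = key_max_and_min_value_alt entry
instance (entry : List (String × Int)) (out : String × String) : Decidable (Spec_key_max_and_min_value entry out) := by unfold Spec_key_max_and_min_value; infer_instance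

-- ===== CLAIM (what is proved, stated in full; the proofs are below) =====
def Claim_equal_key_max_and_min_value : Prop := ∀ (entry : List (String × Int)), Dom_key_max_and_min_value entry → Pre_key_max_and_min_value entry → Spec_key_max_and_min_value entry (key_max_and_min_value entry)

-- ===== LEMMAS AND PROOFS =====

-- A pair-state fold whose components do not interact splits into two folds.
theorem pvFoldlPair {α β γ : Type} (f : α → γ → α) (g : β → γ → β)
    (l : List γ) (a : α) (b : β) :
    l.foldl (fun s x => (f s.1 x, g s.2 x)) (a, b) = (l.foldl f a, l.foldl g b) := by
  induction l generalizing a b with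
  | nil => rfl
  | cons x t ih => simpa using ih (f a x) (g b x)

-- In a duplicate-free association list, looking a key up returns its paired value.
theorem pvGetOfMem (l : List (String × Int)) (hnd : (l.map Prod.fst).Nodup)
    (kv : String × Int) (h : kv ∈ l) : (PySem.Dict.mk l).get? kv.1 = some kv.2 := by
  induction l with
  | nil => cases h
  | cons p t ih =>
    rw [show (PySem.Dict.mk (p :: t)) = PySem.Dict.mk ((p.1, p.2) :: t) by rfl,
        PySem.Dict.get?_mk_cons]
    rcases List.mem_cons.mp h with h | h
    · subst h; simp
    · have hne : p.1 ≠ kv.1 := by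
        intro he
        have : kv.1 ∈ t.map Prod.fst := List.mem_map_of_mem h
        rw [← he] at this
        exact (List.nodup_cons.mp (by simpa using hnd)).1 this
      rw [if_neg (by simpa using hne)]
      exact ih (List.nodup_cons.mp (by simpa using hnd)).2 h

-- B's running-max fold: its value is the running max of the values, and A's
-- "last key equal to the max" fold (seeded with the first item) lands on its key.
theorem pvMaxSpec (t : List (String × Int)) (a : String × Int) :
    (t.foldl (fun st kv => if kv.2 ≥ st.2 then kv else st) a).2
      = (t.map Prod.snd).foldl max a.2 ∧
    t.foldl
        (fun (s : Option String) kv =>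
          if kv.2 = (t.foldl (fun st kv => if kv.2 ≥ st.2 then kv else st) a).2
          then some kv.1 else s)
        (if a.2 = (t.foldl (fun st kv => if kv.2 ≥ st.2 then kv else st) a).2
         then some a.1 else none)
      = some (t.foldl (fun st kv => if kv.2 ≥ st.2 then kv else st) a).1 := by
  induction t generalizing a with
  | nil => simp
  | cons kv t ih =>
    have ha' : ((if kv.2 ≥ a.2 then kv else a)).2 = max a.2 kv.2 := by
      by_cases h : a.2 ≤ kv.2
      · rw [if_pos h, max_eq_right h]
      · rw [if_neg (by omega), max_eq_left (by omega)]
    obtain ⟨ih1, ih2⟩ := ih (if kv.2 ≥ a.2 then kv else a)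
    constructor
    · simpa [ha'] using ih1
    · -- final value V dominates the intermediate accumulator
      have hV : ((if kv.2 ≥ a.2 then kv else a)).2 ≤
          ((kv :: t).foldl (fun st kv => if kv.2 ≥ st.2 then kv else st) a).2 := by
        rw [List.foldl_cons, ih1, ha', ← ha']
        exact (PySem.List.le_foldl_max (t.map Prod.snd) _).1
      rw [List.foldl_cons]
      rw [show ((kv :: t).foldl (fun st kv => if kv.2 ≥ st.2 then kv else st) a)
            = (t.foldl (fun st kv => if kv.2 ≥ st.2 then kv else st)
                (if kv.2 ≥ a.2 then kv else a)) from by rw [List.foldl_cons]] at *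
      set V := (t.foldl (fun st kv => if kv.2 ≥ st.2 then kv else st)
                (if kv.2 ≥ a.2 then kv else a)).2 with hVdef
      rw [← ih2]
      congr 1
      by_cases h : a.2 ≤ kv.2
      · simp only [ge_iff_le, if_pos h] at hV ⊢
        by_cases hkv : kv.2 = V
        · simp [hkv]
        · have hne : a.2 ≠ V := by omega
          simp [hkv, hne]
      · simp only [ge_iff_le, if_neg h] at hV ⊢
        have hne : kv.2 ≠ V := by omega
        simp [hne]

-- Mirror of pvMaxSpec for the running minimum.
theorem pvMinSpec (t : List (String × Int)) (a : String × Int) :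
    (t.foldl (fun st kv => if kv.2 ≤ st.2 then kv else st) a).2
      = (t.map Prod.snd).foldl min a.2 ∧
    t.foldl
        (fun (s : Option String) kv =>
          if kv.2 = (t.foldl (fun st kv => if kv.2 ≤ st.2 then kv else st) a).2
          then some kv.1 else s)
        (if a.2 = (t.foldl (fun st kv => if kv.2 ≤ st.2 then kv else st) a).2
         then some a.1 else none)
      = some (t.foldl (fun st kv => if kv.2 ≤ st.2 then kv else st) a).1 := by
  induction t generalizing a with
  | nil => simp
  | cons kv t ih =>
    have ha' : ((if kv.2 ≤ a.2 then kv else a)).2 = min a.2 kv.2 := by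
      by_cases h : kv.2 ≤ a.2
      · rw [if_pos h, min_eq_right h]
      · rw [if_neg (by omega), min_eq_left (by omega)]
    obtain ⟨ih1, ih2⟩ := ih (if kv.2 ≤ a.2 then kv else a)
    constructor
    · simpa [ha'] using ih1
    · have hV : ((kv :: t).foldl (fun st kv => if kv.2 ≤ st.2 then kv else st) a).2 ≤
          ((if kv.2 ≤ a.2 then kv else a)).2 := by
        rw [List.foldl_cons, ih1, ha', ← ha']
        exact (PySem.List.foldl_min_le (t.map Prod.snd) _).1
      rw [List.foldl_cons]
      rw [show ((kv :: t).foldl (fun st kv => if kv.2 ≤ st.2 then kv else st) a)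
            = (t.foldl (fun st kv => if kv.2 ≤ st.2 then kv else st)
                (if kv.2 ≤ a.2 then kv else a)) from by rw [List.foldl_cons]] at *
      set V := (t.foldl (fun st kv => if kv.2 ≤ st.2 then kv else st)
                (if kv.2 ≤ a.2 then kv else a)).2 with hVdef
      rw [← ih2]
      congr 1
      by_cases h : kv.2 ≤ a.2
      · simp only [if_pos h] at hV ⊢
        by_cases hkv : kv.2 = V
        · simp [hkv]
        · have hne : a.2 ≠ V := by omega
          simp [hkv, hne]
      · simp only [if_neg h] at hV ⊢
        have hne : kv.2 ≠ V := by omega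
        simp [hne]

-- ===== VERDICT (by name: the statement is the Claim_ definition above) =====
theorem key_max_and_min_value_spec : Claim_equal_key_max_and_min_value := by
  intro entry _ hpre
  obtain ⟨hne, hnd⟩ := hpre
  unfold Spec_key_max_and_min_value
  match entry, hne with
  | a :: t, _ =>
    have hnd' : ((a :: t).map Prod.fst).Nodup := hnd
    -- evaluate A's max()/min()
    have hmax : PySem.List.max? ((a :: t).map Prod.snd) (fun y => y)
        = some ((t.map Prod.snd).foldl max a.2) := by
      rw [List.map_cons, PySem.List.max?_id_cons]
    have hmin : PySem.List.min? ((a :: t).map Prod.snd) (fun y => y)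
        = some ((t.map Prod.snd).foldl min a.2) := by
      rw [List.map_cons, PySem.List.min?_id_cons]
    obtain ⟨hbM1, hbM2⟩ := pvMaxSpec t a
    obtain ⟨hbm1, hbm2⟩ := pvMinSpec t a
    set M := (t.map Prod.snd).foldl max a.2 with hM
    set m := (t.map Prod.snd).foldl min a.2 with hm
    -- A's key loop over (map fst) with lookups equals the pair fold
    have hfold :
        (((a :: t).map Prod.fst).foldl
          (fun (s : Option String × Option String) key =>
            (if (PySem.Dict.mk (a :: t)).get? key = some M then some key else s.1,
             if (PySem.Dict.mk (a :: t)).get? key = some m then some key else s.2))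
          (none, none))
        = ((a :: t).foldl
            (fun (s : Option String × Option String) kv =>
              (if kv.2 = M then some kv.1 else s.1,
               if kv.2 = m then some kv.1 else s.2))
            (none, none)) := by
      rw [List.foldl_map]
      exact PySem.List.foldl_congr_mem _ _ _ _ (by
        intro acc kv hkv
        rw [pvGetOfMem (a :: t) hnd' kv hkv]
        simp)
    unfold key_max_and_min_value key_max_and_min_value_alt
    rw [hmax, hmin]
    simp only [hfold]
    have hA : List.foldl
        (fun (s : Option String × Option String) (kv : String × Int) =>
          (if kv.2 = M then some kv.1 else s.1, if kv.2 = m then some kv.1 else s.2))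
        (none, none) (a :: t)
        = (List.foldl (fun (s : Option String) (kv : String × Int) =>
              if kv.2 = M then some kv.1 else s) (if a.2 = M then some a.1 else none) t,
           List.foldl (fun (s : Option String) (kv : String × Int) =>
              if kv.2 = m then some kv.1 else s) (if a.2 = m then some a.1 else none) t) := by
      rw [List.foldl_cons]
      exact pvFoldlPair
        (fun (s : Option String) (kv : String × Int) => if kv.2 = M then some kv.1 else s)
        (fun (s : Option String) (kv : String × Int) => if kv.2 = m then some kv.1 else s)
        t _ _
    have hB : List.foldl
        (fun (st : (String × Int) × (String × Int)) (kv : String × Int) =>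
          (if kv.2 ≥ st.1.2 then kv else st.1, if kv.2 ≤ st.2.2 then kv else st.2))
        (a, a) t
        = (List.foldl (fun (st : String × Int) (kv : String × Int) =>
              if kv.2 ≥ st.2 then kv else st) a t,
           List.foldl (fun (st : String × Int) (kv : String × Int) =>
              if kv.2 ≤ st.2 then kv else st) a t) :=
      pvFoldlPair
        (fun (st : String × Int) (kv : String × Int) => if kv.2 ≥ st.2 then kv else st)
        (fun (st : String × Int) (kv : String × Int) => if kv.2 ≤ st.2 then kv else st)
        t a a
    rw [hA, hB]
    dsimp only
    rw [← hbM1, ← hbm1, hbM2, hbm2]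
    rfl
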